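-- pv_equiv track=rewrite | github.com/mdn/kuma | vendor/packages/translate-toolkit/translate/search/segment.py | character_iter
-- ===== SOURCE A (Python) =====
-- punctuation = u".,;:!?-@#$%^*_()[]{}/\\'\"<>‘’‚‛“”„‟′″‴‵‶‷‹›«»±³¹²°¿©®×£¥"
--
-- def character_iter(text):
--     """Returns an iterator over the characters in text."""
--     #We don't return more than one consecutive whitespace character
--     prev = 'A'
--     for c in text:
--         if c.isspace() and prev.isspace():
--             continue
--         prev = c
--         if not (c in punctuation):
--             yield c.lower()
-- ===== SOURCE B (Python) =====
-- punctuation = u".,;:!?-@#$%^*_()[]{}/\\'\"<>\u2018\u2019\u201a\u201b\u201c\u201d\u201e\u201f\u2032\u2033\u2034\u2035\u2036\u2037\u2039\u203a\u00ab\u00bb\u00b1\u00b3\u00b9\u00b2\u00b0\u00bf\u00a9\u00ae\u00d7\u00a3\u00a5"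
--
-- def character_iter(text):
--     """Returns an iterator over the characters in text."""
--     # Run-based: emit only the first character of each whitespace run,
--     # every character of each non-whitespace run, then filter/lower.
--     def collapsed(s):
--         i, n = 0, len(s)
--         while i < n:
--             if s[i].isspace():
--                 yield s[i]
--                 i += 1
--                 while i < n and s[i].isspace():
--                     i += 1
--             else:
--                 j = i
--                 while j < n and not s[j].isspace():
--                     j += 1
--                 yield from s[i:j]
--                 i = j
--     for c in collapsed(text):
--         if c not in punctuation:
--             yield c.lower()
-- ===== Notes on version B (the rewrite author's own statement) =====
-- stated objective: alternative
-- what changed: B replaces A's prev-character state machine with a run-based two-pass generator: it splits the text into maximal whitespace/non-whitespace runs with index scans, emits only the first character of each whitespace run, then filters punctuation and lowercases.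
import Mathlib
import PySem

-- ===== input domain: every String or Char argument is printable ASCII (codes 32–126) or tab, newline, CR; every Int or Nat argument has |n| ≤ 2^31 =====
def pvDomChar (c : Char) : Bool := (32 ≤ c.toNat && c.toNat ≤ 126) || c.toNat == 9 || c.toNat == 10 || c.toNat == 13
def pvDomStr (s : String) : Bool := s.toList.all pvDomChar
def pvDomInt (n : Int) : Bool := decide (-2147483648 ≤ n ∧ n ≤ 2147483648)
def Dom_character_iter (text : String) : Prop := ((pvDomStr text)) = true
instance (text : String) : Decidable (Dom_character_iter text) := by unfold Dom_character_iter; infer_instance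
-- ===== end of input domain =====

-- B collapses whitespace by runs (emit first char of each whitespace run, all of a
-- non-whitespace run) instead of A's prev-character state machine; objective: alternative.

-- ===== PORT A =====
def pvPunct : List Char := ".,;:!?-@#$%^*_()[]{}/\\'\"<>‘’‚‛“”„‟′″‴‵‶‷‹›«»±³¹²°¿©®×£¥".toList

def pvAuxA : Char → List Char → List String
  | _, [] => []
  | prev, c :: rest =>
    if PySem.Chars.isspace c && PySem.Chars.isspace prev then
      pvAuxA prev rest
    else if pvPunct.contains c then
      pvAuxA c rest
    else
      String.ofList [PySem.Chars.lowerChar c] :: pvAuxA c rest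

def character_iter (text : String) : List String := pvAuxA 'A' text.toList

-- ===== PORT B =====
-- the run-splitting generator `collapsed` of Source B (inner while loops = takeWhile/dropWhile)
def pvCollapse : List Char → List Char
  | [] => []
  | c :: r =>
    if PySem.Chars.isspace c then
      c :: pvCollapse (r.dropWhile (fun d => PySem.Chars.isspace d))
    else
      (c :: r.takeWhile (fun d => !PySem.Chars.isspace d)) ++
        pvCollapse (r.dropWhile (fun d => !PySem.Chars.isspace d))
termination_by l => l.length
decreasing_by
  · exact Nat.lt_succ_of_le (List.length_dropWhile_le _ _)
  · exact Nat.lt_succ_of_le (List.length_dropWhile_le _ _)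

def pvEmit (c : Char) : Option String :=
  if pvPunct.contains c then none else some (String.ofList [PySem.Chars.lowerChar c])

def character_iter_alt (text : String) : List String :=
  (pvCollapse text.toList).filterMap pvEmit

-- ===== PRECONDITION & SPEC =====
def Spec_character_iter (text : String) (out : List String) : Prop := out = character_iter_alt text
instance (text : String) (out : List String) : Decidable (Spec_character_iter text out) := by unfold Spec_character_iter; infer_instance

-- ===== CLAIM (what is proved, stated in full; the proofs are below) =====
def Claim_equal_character_iter : Prop := ∀ (text : String), Dom_character_iter text → Spec_character_iter text (character_iter text)

-- ===== LEMMAS AND PROOFS =====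

-- A's state machine depends on prev only through isspace prev
def pvF : Bool → List Char → List String
  | _, [] => []
  | b, c :: rest =>
    if PySem.Chars.isspace c && b then
      pvF b rest
    else if pvPunct.contains c then
      pvF (PySem.Chars.isspace c) rest
    else
      String.ofList [PySem.Chars.lowerChar c] :: pvF (PySem.Chars.isspace c) rest

theorem pvAuxA_eq_pvF (l : List Char) : ∀ prev, pvAuxA prev l = pvF (PySem.Chars.isspace prev) l := by
  induction l with
  | nil => intro prev; rfl
  | cons c rest ih =>
    intro prev
    simp only [pvAuxA, pvF, ih]

theorem pvF_true_drop (l : List Char) :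
    pvF true l = pvF true (l.dropWhile (fun d => PySem.Chars.isspace d)) := by
  induction l with
  | nil => rfl
  | cons c rest ih =>
    by_cases h : PySem.Chars.isspace c
    · simpa [pvF, h] using ih
    · simp [h]

theorem pvF_true_eq_false (l : List Char)
    (h : ∀ c ∈ l.head?, PySem.Chars.isspace c = false) :
    pvF true l = pvF false l := by
  cases l with
  | nil => rfl
  | cons c rest =>
    have hc : PySem.Chars.isspace c = false := h c rfl
    simp [pvF, hc]

theorem pvF_false_split (l : List Char) :
    pvF false l =
      (l.takeWhile (fun d => !PySem.Chars.isspace d)).filterMap pvEmit ++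
        pvF false (l.dropWhile (fun d => !PySem.Chars.isspace d)) := by
  induction l with
  | nil => rfl
  | cons c rest ih =>
    by_cases h : PySem.Chars.isspace c
    · simp [h]
    · by_cases hp : c ∈ pvPunct <;>
        simp [pvF, pvEmit, h, hp, ih]

theorem pvF_false_eq_collapse (l : List Char) :
    pvF false l = (pvCollapse l).filterMap pvEmit := by
  induction l using pvCollapse.induct with
  | case1 => simp [pvF, pvCollapse]
  | case2 c r h ih =>
    have hdrop : ∀ d ∈ (r.dropWhile (fun d => PySem.Chars.isspace d)).head?,
        PySem.Chars.isspace d = false := by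
      intro d hd
      have := List.head?_dropWhile_not (fun d => PySem.Chars.isspace d) r
      simp_all
    have h1 : pvF true r = pvF false (r.dropWhile (fun d => PySem.Chars.isspace d)) := by
      rw [pvF_true_drop, pvF_true_eq_false _ hdrop]
    by_cases hp : c ∈ pvPunct <;>
      simp [pvF, pvCollapse, pvEmit, h, hp, h1, ih]
  | case3 c r h ih =>
    rw [pvCollapse]
    simp only [h, if_neg, Bool.false_eq_true, not_false_iff, List.filterMap_append]
    have hs := pvF_false_split (c :: r)
    simp only [List.takeWhile_cons, List.dropWhile_cons, h] at hs
    simp only [Bool.not_false, ite_true] at hs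
    rw [hs, ih]

-- ===== VERDICT (by name: the statement is the Claim_ definition above) =====
theorem character_iter_spec : Claim_equal_character_iter := by
  intro text _
  show character_iter text = character_iter_alt text
  unfold character_iter character_iter_alt
  rw [pvAuxA_eq_pvF, ← pvF_false_eq_collapse,
    show PySem.Chars.isspace 'A' = false from by decide]
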